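-- pv_equiv track=rewrite | github.com/GuilongMa/python- | 二分查找/erfen_check.py | get_last_small_equal_value
-- ===== SOURCE A (Python) =====
-- def get_last_small_equal_value(L, n, value):
--     left = 0
--     right = n - 1
--     while left <= right:
--         mid = left + ((right - left) >> 1)
--         if value >= L[mid]:
--             if mid == n - 1 or L[mid + 1] > value:
--                 return mid
--             left = mid + 1
--         else:
--             right = mid - 1
--     return None
-- ===== SOURCE B (Python) =====
-- def get_last_small_equal_value(L, n, value):
--     count = 0
--     for i in range(n):
--         if L[i] <= value:
--             count += 1
--     if count == 0:
--         return None
--     return count - 1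
-- ===== Notes on version B (the rewrite author's own statement) =====
-- stated objective: simpler
-- what changed: Replaces A's binary search with neighbor peek by a single counting pass: on a sorted prefix the last index with L[i] <= value equals the number of elements <= value minus one, so B just counts and returns count-1 (or None when the count is 0).
-- outside the precondition, e.g. on get_last_small_equal_value([0, 0, 0, 0, 5, 0, 0], 7, 0): A returns 3, B returns 5; on get_last_small_equal_value([-2, -2, -2, -1], 6, -2): A returns 2, B raises IndexError
import Mathlib
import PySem

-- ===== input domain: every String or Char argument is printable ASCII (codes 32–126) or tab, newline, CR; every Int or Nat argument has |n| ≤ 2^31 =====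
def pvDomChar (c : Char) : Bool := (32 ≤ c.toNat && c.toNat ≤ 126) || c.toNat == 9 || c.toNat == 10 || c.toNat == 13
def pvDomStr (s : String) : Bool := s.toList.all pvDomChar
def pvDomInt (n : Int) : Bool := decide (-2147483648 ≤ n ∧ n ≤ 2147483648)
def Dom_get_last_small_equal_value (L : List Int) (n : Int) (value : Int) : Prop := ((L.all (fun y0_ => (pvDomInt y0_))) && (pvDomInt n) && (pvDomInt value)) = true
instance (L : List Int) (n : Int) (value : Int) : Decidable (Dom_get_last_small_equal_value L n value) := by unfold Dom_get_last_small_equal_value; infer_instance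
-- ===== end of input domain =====

-- B replaces A's binary search (with its neighbor peek at L[mid+1]) by a single counting pass:
-- on a sorted prefix the last index with L[i] <= value is the number of elements <= value minus
-- one (objective: simpler; a plain linear count instead of search).

-- ===== PORT A =====
-- A's while loop as structural recursion on the shrinking interval [left, right]
-- fuel = the interval size (right + 1 - left).toNat, which strictly shrinks each iteration;
-- the fuel-0 arm under the guard is unreachable for the fuel the wrapper supplies
def pvLoopA (L : List Int) (n : Int) (value : Int) (fuel : Nat) (left right : Int) : Option Int :=
  if left ≤ right then
    match fuel with
    | 0 => none               -- unreachable: fuel ≥ right + 1 - left at every call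
    | fuel + 1 =>
      let mid := left + ((right - left) >>> (1 : Nat))   -- '>> 1' of a nonnegative int
      match PySem.List.pyGet? L mid with
      | none => none          -- L[mid] raises IndexError; excluded by Pre_
      | some x =>
        if value ≥ x then
          if mid = n - 1 then some mid
          else
            match PySem.List.pyGet? L (mid + 1) with
            | none => none    -- L[mid+1] raises IndexError; excluded by Pre_
            | some y =>
              if y > value then some mid
              else pvLoopA L n value fuel (mid + 1) right
        else pvLoopA L n value fuel left (mid - 1)
  else none

def get_last_small_equal_value (L : List Int) (n : Int) (value : Int) : Option Int :=
  pvLoopA L n value ((n - 1) + 1 - 0).toNat 0 (n - 1)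

-- ===== PORT B =====
-- B's for loop over range(n): count the elements L[i] <= value, recursing on the index list
def pvCountB (L : List Int) (value : Int) : List Int → Int → Option Int
  | [], c => some c
  | i :: rest, c =>
    match PySem.List.pyGet? L i with
    | none => none            -- L[i] raises IndexError; excluded by Pre_
    | some x => pvCountB L value rest (if x ≤ value then c + 1 else c)

def get_last_small_equal_value_alt (L : List Int) (n : Int) (value : Int) : Option Int :=
  match pvCountB L value (PySem.List.pyRange 0 n 1) 0 with
  | none => none              -- the loop raised; excluded by Pre_
  | some count => if count = 0 then none else some (count - 1)

-- ===== PRECONDITION & SPEC =====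
-- Pre_ restricts to binary search's natural domain: n at most the list length (a larger n makes
-- A raise IndexError on some inputs and return an accidental early hit on others, where B raises)
-- and the searched prefix sorted (on unsorted prefixes A's result is an accident of the probe
-- order and neither result is 'the' last index with L[i] <= value).
def Pre_get_last_small_equal_value (L : List Int) (n : Int) (value : Int) : Prop :=
  n ≤ L.length ∧ (L.take n.toNat).Pairwise (· ≤ ·)
instance (L : List Int) (n : Int) (value : Int) : Decidable (Pre_get_last_small_equal_value L n value) := by unfold Pre_get_last_small_equal_value; infer_instance

def pvWitness_get_last_small_equal_value : List Int × Int × Int := ([1, 2, 2, 5], 4, 2)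

def Spec_get_last_small_equal_value (L : List Int) (n : Int) (value : Int) (out : Option Int) : Prop := out = get_last_small_equal_value_alt L n value
instance (L : List Int) (n : Int) (value : Int) (out : Option Int) : Decidable (Spec_get_last_small_equal_value L n value out) := by unfold Spec_get_last_small_equal_value; infer_instance

-- ===== CLAIM (what is proved, stated in full; the proofs are below) =====
def Claim_equal_get_last_small_equal_value : Prop := ∀ (L : List Int) (n : Int) (value : Int), Dom_get_last_small_equal_value L n value → Pre_get_last_small_equal_value L n value → Spec_get_last_small_equal_value L n value (get_last_small_equal_value L n value)

-- ===== LEMMAS AND PROOFS =====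

-- a monotone-decreasing predicate on range n has a threshold: P i ↔ i < countP P (range n)
lemma pvThreshold (P : Nat → Bool)
    : ∀ n : Nat, (∀ i j : Nat, i ≤ j → j < n → P j = true → P i = true) →
      ∀ i : Nat, i < n → (P i = true ↔ i < (List.range n).countP P) := by
  intro n
  induction n with
  | zero => intro _ i hi; omega
  | succ n ih =>
    intro mono i hi
    have hle : (List.range n).countP P ≤ n := by
      have := List.countP_le_length (p := P) (l := List.range n)
      simpa using this
    rw [List.range_succ, List.countP_append]
    by_cases hPn : P n = true
    · have hall : (List.range n).countP P = n := by
        have : ∀ x ∈ List.range n, P x = true := by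
          intro x hx
          exact mono x n (by simp at hx; omega) (by omega) hPn
        calc (List.range n).countP P = (List.range n).length := List.countP_eq_length.2 this
          _ = n := List.length_range
      simp [hall, hPn]
      constructor
      · intro _; omega
      · intro _
        rcases Nat.lt_or_ge i n with h | h
        · exact mono i n (by omega) (by omega) hPn
        · have : i = n := by omega
          simpa [this] using hPn
    · have hc : List.countP P [n] = 0 := by simp [hPn]
      rw [hc]
      rcases Nat.lt_or_ge i n with h | h
      · exact ih (fun a b hab hb hPb => mono a b hab (by omega) hPb) i h
      · have : i = n := by omega
        subst this
        simp [hPn]; omega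

-- A's loop returns (if k = 0 then none else some (k-1)) for a threshold k, under the loop
-- invariants 0 ≤ left ≤ k ≤ right + 1 ≤ n (strict left < k while k > 0)
lemma pvLoopA_eq (L : List Int) (n value k : Int)
    (hSome : ∀ i : Int, 0 ≤ i → i < n → ∃ x, PySem.List.pyGet? L i = some x)
    (hP : ∀ (i x : Int), 0 ≤ i → i < n → PySem.List.pyGet? L i = some x → (x ≤ value ↔ i < k))
    (hk0 : 0 ≤ k) (hkn : k ≤ n)
    : ∀ (m : Nat) (left right : Int), (right + 1 - left).toNat ≤ m →
      0 ≤ left → right ≤ n - 1 → left ≤ k → (0 < k → left < k) → k ≤ right + 1 →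
      pvLoopA L n value m left right = (if k = 0 then none else some (k - 1)) := by
  intro m
  induction m with
  | zero =>
    intro left right hm h0 hr hlk hstrict hkr
    have hlr : ¬ left ≤ right := by omega
    rw [pvLoopA, if_neg hlr]
    have hk : k = 0 := by
      by_cases h : 0 < k
      · exact absurd (hstrict h) (by omega)
      · omega
    simp [hk]
  | succ m ih =>
    intro left right hm h0 hr hlk hstrict hkr
    rw [pvLoopA]
    by_cases hlr : left ≤ right
    · rw [if_pos hlr]
      have hsh : (right - left) >>> (1 : Nat) = (right - left) / 2 := by
        rw [Int.shiftRight_eq_div_pow]; norm_num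
      have hmb : left ≤ left + ((right - left) >>> (1 : Nat)) ∧
          left + ((right - left) >>> (1 : Nat)) ≤ right := by omega
      obtain ⟨x, hx⟩ := hSome (left + ((right - left) >>> (1 : Nat))) (by omega) (by omega)
      simp only [hx]
      clear hsh
      generalize hg : left + (right - left) >>> (1 : Nat) = mid at hx hmb ⊢
      obtain ⟨hmb1, hmb2⟩ := hmb
      have hxk := hP mid x (by omega) (by omega) hx
      by_cases hvx : value ≥ x
      · rw [if_pos hvx]
        have hmidk : mid < k := hxk.1 (by omega)
        by_cases hend : mid = n - 1
        · rw [if_pos hend]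
          have hke : k = mid + 1 := by omega
          rw [if_neg (by omega)]
          congr 1
          omega
        · rw [if_neg hend]
          obtain ⟨y, hy⟩ := hSome (mid + 1) (by omega) (by omega)
          simp only [hy]
          have hyk := hP (mid + 1) y (by omega) (by omega) hy
          by_cases hyv : y > value
          · rw [if_pos hyv]
            have h1 : ¬ (mid + 1 < k) := fun hc => absurd (hyk.2 hc) (by omega)
            rw [if_neg (by omega)]
            congr 1
            omega
          · rw [if_neg hyv]
            have h2 : mid + 1 < k := hyk.1 (by omega)
            exact ih (mid + 1) right (by omega) (by omega) hr (by omega) (fun _ => by omega) (by omega)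
      · rw [if_neg hvx]
        have hkm : ¬ (mid < k) := fun hc => absurd (hxk.2 hc) (by omega)
        exact ih left (mid - 1) (by omega) h0 (by omega) hlk hstrict (by omega)
    · rw [if_neg hlr]
      have hk : k = 0 := by
        by_cases h : 0 < k
        · exact absurd (hstrict h) (by omega)
        · omega
      simp [hk]

-- B's counting loop returns some (c + #{i in the index list with L[i] ≤ value})
-- whenever every index is in range
lemma pvCountB_eq (L : List Int) (value : Int)
    : ∀ (is : List Int) (c : Int),
      (∀ i ∈ is, ∃ x, PySem.List.pyGet? L i = some x) →
      pvCountB L value is c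
        = some (c + (is.countP (fun i => decide ((PySem.List.pyGet? L i).getD 0 ≤ value)) : Int)) := by
  intro is
  induction is with
  | nil => intro c _; simp [pvCountB]
  | cons i rest ih =>
    intro c hin
    obtain ⟨x, hx⟩ := hin i (by simp)
    rw [pvCountB, hx]
    dsimp only
    rw [ih _ (fun j hj => hin j (by simp [hj]))]
    rw [List.countP_cons, hx]
    by_cases hxv : x ≤ value
    · simp [hxv]; omega
    · simp [hxv]

-- ===== VERDICT (by name: the statement is the Claim_ definition above) =====
theorem get_last_small_equal_value_spec : Claim_equal_get_last_small_equal_value := by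
  intro L n value _hdom hpre
  obtain ⟨hn, hsort⟩ := hpre
  unfold Spec_get_last_small_equal_value get_last_small_equal_value get_last_small_equal_value_alt
  by_cases hpos : 0 < n
  · -- the sorted prefix yields a threshold k for the predicate L[i] <= value
    have hmonoElem : ∀ i j : Nat, i ≤ j → j < n.toNat → L.getD i 0 ≤ L.getD j 0 := by
      intro i j hij hj
      rcases Nat.lt_or_ge i j with h | h
      · have hlen : (L.take n.toNat).length = n.toNat := by simp; omega
        have := List.pairwise_iff_getElem.1 hsort i j (by omega) (by omega) h
        rw [List.getElem_take, List.getElem_take] at this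
        rw [List.getD_eq_getElem L 0 (by omega), List.getD_eq_getElem L 0 (by omega)]
        exact this
      · have : i = j := by omega
        simp [this]
    have hmono : ∀ i j : Nat, i ≤ j → j < n.toNat →
        decide (L.getD j 0 ≤ value) = true → decide (L.getD i 0 ≤ value) = true := by
      intro i j hij hj hPj
      simp only [decide_eq_true_eq] at hPj ⊢
      exact le_trans (hmonoElem i j hij hj) hPj
    have hget : ∀ i : Int, 0 ≤ i → i < n → PySem.List.pyGet? L i = some (L.getD i.toNat 0) := by
      intro i h0 hi
      rw [PySem.List.pyGet?_eq_some_getElem (h0 := by omega) (h1 := by omega)]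
      rw [List.getD_eq_getElem L 0 (by omega)]
    have hthr := pvThreshold (fun i => decide (L.getD i 0 ≤ value)) n.toNat hmono
    have hKle : (List.range n.toNat).countP (fun i => decide (L.getD i 0 ≤ value)) ≤ n.toNat := by
      have := List.countP_le_length (p := fun i => decide (L.getD i 0 ≤ value))
        (l := List.range n.toNat)
      simpa using this
    have hSome : ∀ i : Int, 0 ≤ i → i < n → ∃ x, PySem.List.pyGet? L i = some x :=
      fun i h0 hi => ⟨L.getD i.toNat 0, hget i h0 hi⟩
    have hP : ∀ (i x : Int), 0 ≤ i → i < n → PySem.List.pyGet? L i = some x →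
        (x ≤ value ↔ i < ((List.range n.toNat).countP (fun i => decide (L.getD i 0 ≤ value)) : Int)) := by
      intro i x h0 hi hx
      rw [hget i h0 hi] at hx
      obtain rfl : L.getD i.toNat 0 = x := by injection hx
      have := hthr i.toNat (by omega)
      simp only [decide_eq_true_eq] at this
      rw [this]
      omega
    set K : Nat := (List.range n.toNat).countP (fun i => decide (L.getD i 0 ≤ value)) with hK
    have hk0 : (0 : Int) ≤ (K : Int) := by omega
    have hkn : (K : Int) ≤ n := by omega
    rw [pvLoopA_eq L n value (K : Int) hSome hP hk0 hkn ((n - 1) + 1 - 0).toNat 0 (n - 1)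
        (by omega) (by omega) (by omega) hk0 (fun h => by omega) (by omega)]
    -- B's counting pass also yields K
    rw [pvCountB_eq L value (PySem.List.pyRange 0 n 1) 0
        (fun i hi => hSome i ((PySem.List.mem_pyRange_one.1 hi).1) ((PySem.List.mem_pyRange_one.1 hi).2))]
    have hcount : (PySem.List.pyRange 0 n 1).countP
        (fun i => decide ((PySem.List.pyGet? L i).getD 0 ≤ value)) = K := by
      rw [PySem.List.pyRange_one]
      rw [List.countP_map]
      rw [hK]
      have hnn : (n - 0).toNat = n.toNat := by omega
      rw [hnn]
      apply List.countP_congr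
      intro k hk
      simp only [List.mem_range] at hk
      simp only [Function.comp]
      rw [hget (0 + (k : Int)) (by omega) (by omega)]
      simp
    rw [hcount]
    dsimp only
    -- both sides: if K = 0 then none else some (K - 1)
    simp only [zero_add]
  · -- n ≤ 0: A's loop exits at once and B's range is empty
    rw [pvLoopA.eq_def, if_neg (by omega)]
    rw [PySem.List.pyRange_one_eq_nil (by omega)]
    simp [pvCountB]
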